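-- pv_equiv track=rewrite | github.com/liutingqin/shiyou | task2.py | replace_repeated_chars
-- ===== SOURCE A (Python) =====
-- def replace_repeated_chars(s):
--     # 创建一个新的字符串用于存储结果
--     result = []
--
--     # 遍历输入字符串的每个字符
--     for i in range(len(s)):
--         # 判断当前字符是否在前十个字符中出现过
--         if s[i] in s[max(i-10, 0):i]:
--             result.append('-')  # 如果出现过，添加 '-'
--         else:
--             result.append(s[i])  # 否则，添加原字符
--
--     # 将结果列表转换成字符串并返回
--     return ''.join(result)
-- ===== SOURCE B (Python) =====
-- def replace_repeated_chars(s):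
--     # Sliding window: keep the last up-to-10 characters and a count dict,
--     # updating both incrementally instead of re-slicing the string each step.
--     result = []
--     window = []   # the previous up-to-10 characters, oldest first
--     counts = {}   # char -> number of occurrences inside window
--     for c in s:
--         result.append('-' if counts.get(c, 0) > 0 else c)
--         window.append(c)
--         counts[c] = counts.get(c, 0) + 1
--         if len(window) > 10:
--             old = window.pop(0)
--             counts[old] -= 1
--     return ''.join(result)
-- ===== Notes on version B (the rewrite author's own statement) =====
-- stated objective: alternative
-- what changed: A re-slices s[max(i-10,0):i] and scans that slice for every index; B makes one pass over the characters keeping a sliding window of the last up-to-10 characters plus a count dict, evicting the oldest character and decrementing its count as the window moves.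
import Mathlib
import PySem

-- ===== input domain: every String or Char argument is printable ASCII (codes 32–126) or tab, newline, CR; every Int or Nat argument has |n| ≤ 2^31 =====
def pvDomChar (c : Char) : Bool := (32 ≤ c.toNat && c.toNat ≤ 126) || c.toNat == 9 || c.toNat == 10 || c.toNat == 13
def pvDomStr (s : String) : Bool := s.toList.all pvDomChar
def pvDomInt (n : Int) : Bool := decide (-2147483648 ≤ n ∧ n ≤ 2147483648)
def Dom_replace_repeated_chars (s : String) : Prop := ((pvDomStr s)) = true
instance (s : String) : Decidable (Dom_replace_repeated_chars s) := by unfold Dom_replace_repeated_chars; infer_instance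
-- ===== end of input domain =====

-- B replaces A's per-index re-slicing of the string by an incrementally maintained
-- sliding window (last ≤ 10 chars) plus a count dict; same return value, no slices.

-- ===== PORT A =====
-- for i in range(len(s)): if s[i] in s[max(i-10,0):i]: append '-' else append s[i]
-- (s[i] is always in range here, so pyGetD with a dummy default is exact)
def replace_repeated_chars (s : String) : String :=
  let cs := s.toList
  let result := (PySem.List.pyRange 0 (cs.length : Int) 1).foldl
    (fun (result : List Char) (i : Int) =>
      if (PySem.List.slice cs (some (max (i - 10) 0)) (some i)).contains
           (PySem.List.pyGetD cs i ' ')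
      then result ++ ['-']
      else result ++ [PySem.List.pyGetD cs i ' ']) []
  String.ofList result

-- ===== PORT B =====
-- one fold over the characters; state = (result, window, counts);
-- 'window.pop(0)' under the length-> -10 guard: the window is nonempty there,
-- so headD/tail are exact; 'counts[old] -= 1' is exact because old ∈ window ⊆ counts.
def replace_repeated_chars_alt (s : String) : String :=
  let st := s.toList.foldl
    (fun (st : List Char × List Char × PySem.Dict Char Int) (c : Char) =>
      let result := st.1 ++ [if st.2.2.getD c 0 > 0 then '-' else c]
      let window := st.2.1 ++ [c]
      let counts := st.2.2.insert c (st.2.2.getD c 0 + 1)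
      if window.length > 10 then
        let old := window.headD ' '
        (result, window.tail, counts.insert old (counts.getD old 0 - 1))
      else (result, window, counts))
    ([], [], PySem.Dict.empty)
  String.ofList st.1

-- ===== PRECONDITION & SPEC =====
def Spec_replace_repeated_chars (s : String) (out : String) : Prop := out = replace_repeated_chars_alt s
instance (s : String) (out : String) : Decidable (Spec_replace_repeated_chars s out) := by unfold Spec_replace_repeated_chars; infer_instance

-- ===== CLAIM (what is proved, stated in full; the proofs are below) =====
def Claim_equal_replace_repeated_chars : Prop := ∀ (s : String), Dom_replace_repeated_chars s → Spec_replace_repeated_chars s (replace_repeated_chars s)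

-- ===== LEMMAS AND PROOFS =====

-- the window of previous characters after having processed `done`
def winOf (done : List Char) : List Char := done.drop (done.length - 10)

-- common specification both ports are reduced to
def specGo : List Char → List Char → List Char
  | _, [] => []
  | done, c :: t => (if (winOf done).contains c then '-' else c) :: specGo (done ++ [c]) t

theorem slice_window (done rest : List Char) :
    PySem.List.slice (done ++ rest) (some (max ((done.length : Int) - 10) 0))
      (some (done.length : Int)) = winOf done := by
  rw [PySem.List.slice_toNat _ (le_max_right _ _) (by positivity)]
  have h1 : (max ((done.length : Int) - 10) 0).toNat = done.length - 10 := by omega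
  have h2 : ((done.length : Int)).toNat = done.length := by omega
  rw [h1, h2, List.drop_append_of_le_length (by omega),
      List.take_append_of_le_length (by simp)]
  exact List.take_of_length_le (by simp)

theorem A_go (rest : List Char) : ∀ (done res : List Char),
    (PySem.List.pyRange (done.length : Int) ((done.length : Int) + rest.length) 1).foldl
      (fun (r : List Char) (i : Int) =>
        if (PySem.List.slice (done ++ rest) (some (max (i - 10) 0)) (some i)).contains
             (PySem.List.pyGetD (done ++ rest) i ' ')
        then r ++ ['-']
        else r ++ [PySem.List.pyGetD (done ++ rest) i ' ']) res
    = res ++ specGo done rest := by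
  induction rest with
  | nil => intro done res; simp [PySem.List.pyRange_one_eq_nil, specGo]
  | cons c t ih =>
    intro done res
    rw [PySem.List.pyRange_one_cons (by push_cast [List.length_cons]; omega)]
    rw [List.foldl_cons]
    have hget : PySem.List.pyGetD (done ++ c :: t) (done.length : Int) ' ' = c := by
      simp [PySem.List.pyGetD_natCast, List.getD_eq_getElem?_getD]
    rw [hget, slice_window]
    have hre : done ++ c :: t = (done ++ [c]) ++ t := by simp
    have hlen : (done.length : Int) + 1 = ((done ++ [c]).length : Int) := by simp
    have hend : (done.length : Int) + ((c :: t).length : Int)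
        = ((done ++ [c]).length : Int) + (t.length : Int) := by simp; omega
    rw [hre, hlen, hend, ih]
    by_cases h : c ∈ winOf done <;> simp [h, specGo]


theorem winOf_append (done : List Char) (c : Char) (h : done.length < 10) :
    winOf (done ++ [c]) = winOf done ++ [c] := by
  unfold winOf
  have h1 : done.length - 10 = 0 := by omega
  have h2 : done.length - 9 = 0 := by omega
  simp [h1, h2]

theorem winOf_append_tail (done : List Char) (c : Char) (h : 10 ≤ done.length) :
    winOf (done ++ [c]) = (winOf done).tail ++ [c] := by
  unfold winOf
  rw [List.tail_drop, List.drop_append_of_le_length (by simp)]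
  congr 2
  simp
  omega

theorem length_winOf (done : List Char) : (winOf done).length = done.length - (done.length - 10) := by
  simp [winOf]

theorem B_go (rest : List Char) : ∀ (done res : List Char) (cnt : PySem.Dict Char Int),
    (∀ x, cnt.getD x 0 = ((winOf done).count x : Int)) →
    (rest.foldl
      (fun (st : List Char × List Char × PySem.Dict Char Int) (c : Char) =>
        let result := st.1 ++ [if st.2.2.getD c 0 > 0 then '-' else c]
        let window := st.2.1 ++ [c]
        let counts := st.2.2.insert c (st.2.2.getD c 0 + 1)
        if window.length > 10 then
          let old := window.headD ' '
          (result, window.tail, counts.insert old (counts.getD old 0 - 1))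
        else (result, window, counts))
      (res, winOf done, cnt)).1
    = res ++ specGo done rest := by
  induction rest with
  | nil => intro done res cnt _; simp [specGo]
  | cons c t ih =>
    intro done res cnt hinv
    rw [List.foldl_cons]
    dsimp only
    have htest : (if cnt.getD c 0 > 0 then '-' else c)
        = (if (winOf done).contains c then '-' else c) := by
      rw [hinv c]
      by_cases h : c ∈ winOf done
      · rw [if_pos (by exact_mod_cast List.count_pos_iff.mpr h), if_pos (by simp [h])]
      · rw [if_neg (by simp [List.count_eq_zero_of_not_mem h]), if_neg (by simp [h])]
    have h1 : ∀ x, (cnt.insert c (cnt.getD c 0 + 1)).getD x 0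
        = (((winOf done) ++ [c]).count x : Int) := by
      intro x
      rw [PySem.Dict.getD_insert]
      by_cases hx : x = c
      · subst hx; simp [List.count_append, hinv]
      · simp [hx, hinv, List.count_append, Ne.symm hx]
    rw [htest]
    set ch := (if (winOf done).contains c then '-' else c) with hch
    by_cases hg : ((winOf done) ++ [c]).length > 10
    · rw [if_pos hg]
      have hL : 10 ≤ done.length := by
        have := length_winOf done; simp at hg; omega
      have hne : winOf done ≠ [] := by
        have := length_winOf done
        intro h; rw [h] at this; simp at this; omega
      obtain ⟨hd, tl, hw⟩ := List.exists_cons_of_ne_nil hne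
      have hhead : ((winOf done) ++ [c]).headD ' ' = hd := by rw [hw]; rfl
      have htail : ((winOf done) ++ [c]).tail = winOf (done ++ [c]) := by
        rw [winOf_append_tail done c hL, hw]; rfl
      rw [hhead, htail]
      have h2 : ∀ x, ((cnt.insert c (cnt.getD c 0 + 1)).insert hd
            ((cnt.insert c (cnt.getD c 0 + 1)).getD hd 0 - 1)).getD x 0
          = ((winOf (done ++ [c])).count x : Int) := by
        intro x
        rw [PySem.Dict.getD_insert]
        have hwin : winOf (done ++ [c]) = tl ++ [c] := by
          rw [winOf_append_tail done c hL, hw]; rfl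
        by_cases hx : x = hd
        · subst hx
          rw [if_pos rfl, h1, hwin, hw]
          simp [List.count_append, List.count_cons]
        · rw [if_neg hx, h1, hwin, hw]
          simp [List.count_append, List.count_cons, (Ne.symm hx : ¬ hd = x)]
      have := ih (done ++ [c]) (res ++ [ch]) _ h2
      rw [this]
      simp [specGo, hch]
    · rw [if_neg hg]
      have hL : done.length < 10 := by
        have := length_winOf done; simp at hg; omega
      rw [show (winOf done) ++ [c] = winOf (done ++ [c]) from (winOf_append done c hL).symm]
      have h1' : ∀ x, (cnt.insert c (cnt.getD c 0 + 1)).getD x 0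
          = ((winOf (done ++ [c])).count x : Int) := by
        intro x; rw [winOf_append done c hL]; exact h1 x
      rw [ih (done ++ [c]) (res ++ [ch]) _ h1']
      simp [specGo, hch]

-- ===== VERDICT (by name: the statement is the Claim_ definition above) =====
theorem replace_repeated_chars_spec : Claim_equal_replace_repeated_chars := by
  intro s _
  unfold Spec_replace_repeated_chars replace_repeated_chars replace_repeated_chars_alt
  dsimp only
  have hA := A_go s.toList [] []
  have hB := B_go s.toList [] [] PySem.Dict.empty (by intro x; simp [winOf])
  simp only [List.nil_append, List.length_nil, Nat.cast_zero, zero_add] at hA hB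
  simp only [winOf, List.length_nil, Nat.zero_sub, List.drop_nil] at hB
  rw [hA, hB]
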